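-- pv_equiv track=rewrite | github.com/apillai70/application-auto-discoverer | data/composite_architecture_analyzer.py | _infer_component_type
-- ===== SOURCE A (Python) =====
-- PATTERN_INDICATORS = {
--     'web_tier': {
--         'protocols': ['HTTP', 'HTTPS'],
--         'ports': [80, 443, 8080],
--         'characteristics': ['public_facing', 'stateless'],
--         'weight': 1.0
--     },
--     'api_gateway': {
--         'protocols': ['HTTP', 'HTTPS'],
--         'ports': [8080, 8443, 9090],
--         'characteristics': ['aggregation_point', 'high_fanout'],
--         'weight': 1.2
--     },
--     'app_services': {
--         'protocols': ['HTTP', 'GRPC'],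
--         'ports': list(range(3000, 3100)) + [8080, 9090],
--         'characteristics': ['business_logic', 'east_west_traffic'],
--         'weight': 1.0
--     },
--     'database_layer': {
--         'protocols': ['MYSQL', 'POSTGRESQL', 'ORACLE-TNS', 'TDS', 'MONGODB'],
--         'ports': [3306, 5432, 1521, 1433, 27017],
--         'characteristics': ['data_persistence', 'high_read_write'],
--         'weight': 1.5
--     },
--     'messaging_layer': {
--         'protocols': ['IBMMQ', 'IBMMQ-SSL', 'AMQP', 'KAFKA', 'JMS', 'MQTT'],
--         'ports': [1414, 1415, 5672, 9092, 61616, 1883],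
--         'characteristics': ['async_communication', 'pub_sub'],
--         'weight': 1.3
--     },
--     'cache_layer': {
--         'protocols': ['REDIS'],
--         'ports': [6379, 11211],
--         'characteristics': ['performance_optimization', 'temporary_storage'],
--         'weight': 0.8
--     },
--     'legacy_systems': {
--         'protocols': ['TDS', 'RDP', 'TELNET'],
--         'ports': [1433, 3389, 23],
--         'characteristics': ['thick_client', 'persistent_connection'],
--         'weight': 1.1
--     },
--     'auth_services': {
--         'protocols': ['LDAP', 'KERBEROS'],
--         'ports': [389, 636, 88],
--         'characteristics': ['security', 'centralized_auth'],
--         'weight': 0.9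
--     },
--     'microservices_mesh': {
--         'protocols': ['GRPC', 'HTTP'],
--         'ports': [50051] + list(range(3000, 3050)),
--         'characteristics': ['service_mesh', 'container_orchestration'],
--         'weight': 1.4
--     }
-- }
--
-- def _infer_component_type(protocols, ports):
--     """Infer component type from protocols and ports"""
--
--     protocol_set = set(protocols)
--     port_set = set(ports)
--
--     # Check against pattern indicators
--     for pattern_name, config in PATTERN_INDICATORS.items():
--         protocol_overlap = protocol_set.intersection(set(config['protocols']))
--         port_overlap = port_set.intersection(set(config['ports']))
--
--         if protocol_overlap or port_overlap:
--             return pattern_name.replace('_', ' ').title()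
--
--     return 'Unknown Component'
-- ===== SOURCE B (Python) =====
-- # Inverted index, written out once (derived from PATTERN_INDICATORS): each protocol
-- # string / port number maps to the EARLIEST pattern (insertion order) that lists it.
-- _PROTO_IDX = {
--     'HTTP': 0, 'HTTPS': 0, 'GRPC': 2, 'MYSQL': 3, 'POSTGRESQL': 3, 'ORACLE-TNS': 3, 'TDS': 3,
--     'MONGODB': 3, 'IBMMQ': 4, 'IBMMQ-SSL': 4, 'AMQP': 4, 'KAFKA': 4, 'JMS': 4, 'MQTT': 4,
--     'REDIS': 5, 'RDP': 6, 'TELNET': 6, 'LDAP': 7, 'KERBEROS': 7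
-- }
-- _PORT_IDX = {
--     80: 0, 443: 0, 8080: 0, 8443: 1, 9090: 1, 3000: 2, 3001: 2, 3002: 2, 3003: 2, 3004: 2, 3005:
--     2, 3006: 2, 3007: 2, 3008: 2, 3009: 2, 3010: 2, 3011: 2, 3012: 2, 3013: 2, 3014: 2, 3015: 2,
--     3016: 2, 3017: 2, 3018: 2, 3019: 2, 3020: 2, 3021: 2, 3022: 2, 3023: 2, 3024: 2, 3025: 2,
--     3026: 2, 3027: 2, 3028: 2, 3029: 2, 3030: 2, 3031: 2, 3032: 2, 3033: 2, 3034: 2, 3035: 2,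
--     3036: 2, 3037: 2, 3038: 2, 3039: 2, 3040: 2, 3041: 2, 3042: 2, 3043: 2, 3044: 2, 3045: 2,
--     3046: 2, 3047: 2, 3048: 2, 3049: 2, 3050: 2, 3051: 2, 3052: 2, 3053: 2, 3054: 2, 3055: 2,
--     3056: 2, 3057: 2, 3058: 2, 3059: 2, 3060: 2, 3061: 2, 3062: 2, 3063: 2, 3064: 2, 3065: 2,
--     3066: 2, 3067: 2, 3068: 2, 3069: 2, 3070: 2, 3071: 2, 3072: 2, 3073: 2, 3074: 2, 3075: 2,
--     3076: 2, 3077: 2, 3078: 2, 3079: 2, 3080: 2, 3081: 2, 3082: 2, 3083: 2, 3084: 2, 3085: 2,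
--     3086: 2, 3087: 2, 3088: 2, 3089: 2, 3090: 2, 3091: 2, 3092: 2, 3093: 2, 3094: 2, 3095: 2,
--     3096: 2, 3097: 2, 3098: 2, 3099: 2, 3306: 3, 5432: 3, 1521: 3, 1433: 3, 27017: 3, 1414: 4,
--     1415: 4, 5672: 4, 9092: 4, 61616: 4, 1883: 4, 6379: 5, 11211: 5, 3389: 6, 23: 6, 389: 7,
--     636: 7, 88: 7, 50051: 8
-- }
-- _NAMES = ['Web Tier', 'Api Gateway', 'App Services', 'Database Layer', 'Messaging Layer',
--           'Cache Layer', 'Legacy Systems', 'Auth Services', 'Microservices Mesh']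
--
--
-- def _infer_component_type(protocols, ports):
--     """Infer component type from protocols and ports"""
--     best = None
--     for p in protocols:
--         i = _PROTO_IDX.get(p)
--         if i is not None and (best is None or i < best):
--             best = i
--     for q in ports:
--         i = _PORT_IDX.get(q)
--         if i is not None and (best is None or i < best):
--             best = i
--     return _NAMES[best] if best is not None else 'Unknown Component'
-- ===== Notes on version B (the rewrite author's own statement) =====
-- stated objective: alternative
-- what changed: B replaces A's per-call scan over all patterns with set intersections by a precomputed literal inverted index (dict from each protocol string / port number to the earliest pattern index listing it) and a single min-tracking pass over the input elements with dict lookups.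
import Mathlib
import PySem

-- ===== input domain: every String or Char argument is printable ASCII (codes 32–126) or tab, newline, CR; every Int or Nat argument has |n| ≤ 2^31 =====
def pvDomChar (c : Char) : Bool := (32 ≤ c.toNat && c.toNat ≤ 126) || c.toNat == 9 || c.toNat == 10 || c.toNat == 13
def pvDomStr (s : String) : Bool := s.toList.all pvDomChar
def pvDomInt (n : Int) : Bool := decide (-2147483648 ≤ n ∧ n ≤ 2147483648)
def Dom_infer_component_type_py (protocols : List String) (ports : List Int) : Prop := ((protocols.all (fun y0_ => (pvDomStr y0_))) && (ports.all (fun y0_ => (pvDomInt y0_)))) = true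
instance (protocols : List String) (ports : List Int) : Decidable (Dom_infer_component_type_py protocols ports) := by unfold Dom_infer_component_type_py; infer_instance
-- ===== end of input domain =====

-- B replaces A's per-call scan over all patterns with set intersections by a precomputed
-- literal inverted index (protocol/port → earliest pattern index) and a single min-tracking
-- pass over the input elements (objective: alternative decomposition).

-- ===== PORT A =====
-- PATTERN_INDICATORS: (name, protocols, ports) — the 'characteristics'/'weight' entries
-- are never read by the function and are omitted.
def pvPatterns : List (String × List String × List Int) :=
  [ ("web_tier", ["HTTP", "HTTPS"], [80, 443, 8080]),
    ("api_gateway", ["HTTP", "HTTPS"], [8080, 8443, 9090]),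
    ("app_services", ["HTTP", "GRPC"], PySem.List.pyRange 3000 3100 1 ++ [8080, 9090]),
    ("database_layer", ["MYSQL", "POSTGRESQL", "ORACLE-TNS", "TDS", "MONGODB"],
      [3306, 5432, 1521, 1433, 27017]),
    ("messaging_layer", ["IBMMQ", "IBMMQ-SSL", "AMQP", "KAFKA", "JMS", "MQTT"],
      [1414, 1415, 5672, 9092, 61616, 1883]),
    ("cache_layer", ["REDIS"], [6379, 11211]),
    ("legacy_systems", ["TDS", "RDP", "TELNET"], [1433, 3389, 23]),
    ("auth_services", ["LDAP", "KERBEROS"], [389, 636, 88]),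
    ("microservices_mesh", ["GRPC", "HTTP"], [50051] ++ PySem.List.pyRange 3000 3050 1) ]

-- hand port of str.title() (no PySem primitive): exact on ASCII, and it is only ever
-- applied to the literal pattern names above
def pvTitleGo : List Char → Bool → List Char
  | [], _ => []
  | c :: cs, prevAlpha =>
      (if c.isAlpha then (if prevAlpha then c.toLower else c.toUpper) else c)
        :: pvTitleGo cs c.isAlpha

def pvTitle (s : String) : String := String.ofList (pvTitleGo s.toList false)

def pvInferGoA (protocol_set : PySem.Set String) (port_set : PySem.Set Int) :
    List (String × List String × List Int) → String
  | [] => "Unknown Component"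
  | (pattern_name, cfgProtocols, cfgPorts) :: rest =>
      let protocol_overlap := PySem.Set.inter protocol_set (PySem.Set.ofList cfgProtocols)
      let port_overlap := PySem.Set.inter port_set (PySem.Set.ofList cfgPorts)
      if !protocol_overlap.isEmpty || !port_overlap.isEmpty then
        pvTitle (PySem.Str.replace pattern_name "_" " ")
      else pvInferGoA protocol_set port_set rest

def infer_component_type_py (protocols : List String) (ports : List Int) : String :=
  pvInferGoA (PySem.Set.ofList protocols) (PySem.Set.ofList ports) pvPatterns

-- ===== PORT B =====
-- Source B's module constants: the inverted index written out literally
def pvProtoIdxB : PySem.Dict String Int := PySem.Dict.ofList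
  [ ("HTTP", 0), ("HTTPS", 0), ("GRPC", 2), ("MYSQL", 3), ("POSTGRESQL", 3), ("ORACLE-TNS", 3),
    ("TDS", 3), ("MONGODB", 3), ("IBMMQ", 4), ("IBMMQ-SSL", 4), ("AMQP", 4), ("KAFKA", 4),
    ("JMS", 4), ("MQTT", 4), ("REDIS", 5), ("RDP", 6), ("TELNET", 6), ("LDAP", 7),
    ("KERBEROS", 7) ]

def pvPortIdxB : PySem.Dict Int Int := PySem.Dict.ofList
  [ (80, 0), (443, 0), (8080, 0), (8443, 1), (9090, 1), (3000, 2), (3001, 2), (3002, 2), (3003, 2),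
    (3004, 2), (3005, 2), (3006, 2), (3007, 2), (3008, 2), (3009, 2), (3010, 2), (3011, 2), (3012,
    2), (3013, 2), (3014, 2), (3015, 2), (3016, 2), (3017, 2), (3018, 2), (3019, 2), (3020, 2),
    (3021, 2), (3022, 2), (3023, 2), (3024, 2), (3025, 2), (3026, 2), (3027, 2), (3028, 2), (3029,
    2), (3030, 2), (3031, 2), (3032, 2), (3033, 2), (3034, 2), (3035, 2), (3036, 2), (3037, 2),
    (3038, 2), (3039, 2), (3040, 2), (3041, 2), (3042, 2), (3043, 2), (3044, 2), (3045, 2), (3046,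
    2), (3047, 2), (3048, 2), (3049, 2), (3050, 2), (3051, 2), (3052, 2), (3053, 2), (3054, 2),
    (3055, 2), (3056, 2), (3057, 2), (3058, 2), (3059, 2), (3060, 2), (3061, 2), (3062, 2), (3063,
    2), (3064, 2), (3065, 2), (3066, 2), (3067, 2), (3068, 2), (3069, 2), (3070, 2), (3071, 2),
    (3072, 2), (3073, 2), (3074, 2), (3075, 2), (3076, 2), (3077, 2), (3078, 2), (3079, 2), (3080,
    2), (3081, 2), (3082, 2), (3083, 2), (3084, 2), (3085, 2), (3086, 2), (3087, 2), (3088, 2),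
    (3089, 2), (3090, 2), (3091, 2), (3092, 2), (3093, 2), (3094, 2), (3095, 2), (3096, 2), (3097,
    2), (3098, 2), (3099, 2), (3306, 3), (5432, 3), (1521, 3), (1433, 3), (27017, 3), (1414, 4),
    (1415, 4), (5672, 4), (9092, 4), (61616, 4), (1883, 4), (6379, 5), (11211, 5), (3389, 6), (23,
    6), (389, 7), (636, 7), (88, 7), (50051, 8) ]

def pvNamesB : List String :=
  [ "Web Tier", "Api Gateway", "App Services", "Database Layer", "Messaging Layer",
    "Cache Layer", "Legacy Systems", "Auth Services", "Microservices Mesh" ]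

-- one loop iteration: i = idx.get(x); if i is not None and (best is None or i < best): best = i
def pvBestStep {κ : Type} [BEq κ] (idx : PySem.Dict κ Int) (best : Option Int) (x : κ) :
    Option Int :=
  match idx.get? x with
  | none => best
  | some i =>
      match best with
      | none => some i
      | some b => if i < b then some i else some b

def infer_component_type_py_alt (protocols : List String) (ports : List Int) : String :=
  match ports.foldl (pvBestStep pvPortIdxB) (protocols.foldl (pvBestStep pvProtoIdxB) none) with
  | some b => pvNamesB.getD b.toNat "Unknown Component"  -- _NAMES[best]; best is a valid index
  | none => "Unknown Component"

-- ===== PRECONDITION & SPEC =====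
def Spec_infer_component_type_py (protocols : List String) (ports : List Int) (out : String) : Prop := out = infer_component_type_py_alt protocols ports
instance (protocols : List String) (ports : List Int) (out : String) : Decidable (Spec_infer_component_type_py protocols ports out) := by unfold Spec_infer_component_type_py; infer_instance

-- ===== CLAIM (what is proved, stated in full; the proofs are below) =====
def Claim_equal_infer_component_type_py : Prop := ∀ (protocols : List String) (ports : List Int), Dom_infer_component_type_py protocols ports → Spec_infer_component_type_py protocols ports (infer_component_type_py protocols ports)

-- ===== LEMMAS AND PROOFS =====

-- reference build of the inverted index from the pattern table (proof helper only):
-- fold of setdefault, so each key keeps the EARLIEST pattern index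
def pvSetdefaults {κ : Type} [BEq κ] (d : PySem.Dict κ Int) (ks : List κ) (i : Int) :
    PySem.Dict κ Int :=
  ks.foldl (fun d k => PySem.Dict.setdefault d k i) d

def pvBuildIdx {κ : Type} [BEq κ] (sel : String × List String × List Int → List κ) :
    PySem.Dict κ Int :=
  (PySem.List.enumerate pvPatterns).foldl
    (fun d ip => pvSetdefaults d (sel ip.2) ip.1) PySem.Dict.empty

-- the literal dictionaries of B are exactly that reference build
theorem pvProtoIdxB_eq : pvProtoIdxB = pvBuildIdx (fun pat => pat.2.1) := by decide

set_option maxRecDepth 8192 in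
theorem pvPortIdxB_eq : pvPortIdxB = pvBuildIdx (fun pat => pat.2.2) := by decide

-- minimum on Option Int / Option Nat, none = "no match yet"
def pvOmin : Option Int → Option Int → Option Int
  | none, y => y
  | some a, none => some a
  | some a, some b => some (min a b)

def pvNmin : Option Nat → Option Nat → Option Nat
  | none, y => y
  | some a, none => some a
  | some a, some b => some (min a b)

theorem pvNmin_none_right (x : Option Nat) : pvNmin x none = x := by
  cases x <;> rfl

theorem pvNmin_assoc (x y z : Option Nat) :
    pvNmin (pvNmin x y) z = pvNmin x (pvNmin y z) := by
  cases x <;> cases y <;> cases z <;> simp [pvNmin, min_assoc]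

theorem pvOmin_map_cast (x y : Option Nat) :
    pvOmin (x.map (fun j => (j : Int))) (y.map (fun j => (j : Int)))
      = (pvNmin x y).map (fun j => (j : Int)) := by
  cases x <;> cases y <;> simp [pvOmin, pvNmin, Nat.cast_min]

theorem pvBestStep_eq {κ : Type} [BEq κ] (idx : PySem.Dict κ Int) (b : Option Int) (x : κ) :
    pvBestStep idx b x = pvOmin b (idx.get? x) := by
  unfold pvBestStep pvOmin
  cases idx.get? x with
  | none => cases b <;> rfl
  | some i =>
      cases b with
      | none => rfl
      | some v =>
          show (if i < v then some i else some v) = some (min v i)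
          split_ifs with h <;> exact congrArg some (by omega)

-- indexes looked up through the built dictionaries = first-match index in the table
theorem pvGet?_setdefaults {κ : Type} [BEq κ] [LawfulBEq κ]
    (ks : List κ) (d : PySem.Dict κ Int) (i : Int) (k : κ) :
    (pvSetdefaults d ks i).get? k
      = (d.get? k).orElse (fun _ => if ks.contains k then some i else none) := by
  induction ks generalizing d with
  | nil => cases h : d.get? k <;> simp [pvSetdefaults, h, Option.orElse]
  | cons a ks ih =>
      simp only [pvSetdefaults, List.foldl_cons] at *
      rw [ih]
      by_cases hk : k = a
      · subst hk
        rw [PySem.Dict.get?_setdefault_self]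
        cases h : d.get? k <;> simp [h, Option.orElse, List.contains_cons]
      · rw [PySem.Dict.get?_setdefault_of_ne _ _ hk]
        cases h : d.get? k <;> simp [h, Option.orElse, List.contains_cons, hk]

theorem pvGet?_enumFold {κ α : Type} [BEq κ] [LawfulBEq κ]
    (sel : α → List κ) (l : List α) (d : PySem.Dict κ Int) (n : Int) (k : κ) :
    ((PySem.List.enumerate l n).foldl
        (fun d ip => ((sel ip.2).foldl (fun d k => PySem.Dict.setdefault d k ip.1) d)) d).get? k
      = (d.get? k).orElse
          (fun _ => (l.findIdx? (fun a => (sel a).contains k)).map (fun j => n + (j : Int))) := by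
  induction l generalizing d n with
  | nil => cases h : d.get? k <;> simp [PySem.List.enumerate_nil, h, Option.orElse]
  | cons a l ih =>
      rw [PySem.List.enumerate_cons]
      simp only [List.foldl_cons]
      rw [ih, show ((sel a).foldl (fun d k => PySem.Dict.setdefault d k n) d)
            = pvSetdefaults d (sel a) n from rfl,
          pvGet?_setdefaults, List.findIdx?_cons]
      by_cases hp : (sel a).contains k = true
      · simp only [hp, if_true]
        cases h : d.get? k <;> simp [h, Option.orElse]
      · simp only [hp, Bool.false_eq_true, if_false]
        cases h : d.get? k <;>
          cases hf : l.findIdx? (fun a => (sel a).contains k) <;>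
            simp [h, hf, Option.orElse] <;> push_cast <;> ring

theorem pvBuildIdx_get? {κ : Type} [BEq κ] [LawfulBEq κ]
    (sel : String × List String × List Int → List κ) (k : κ) :
    (pvBuildIdx sel).get? k
      = (pvPatterns.findIdx? (fun a => (sel a).contains k)).map (fun j => (j : Int)) := by
  unfold pvBuildIdx pvSetdefaults
  rw [pvGet?_enumFold]
  cases h : pvPatterns.findIdx? (fun a => (sel a).contains k) <;>
    simp [PySem.Dict.get?_empty, h, Option.orElse]

theorem pvProtoIdxB_get? (p : String) :
    pvProtoIdxB.get? p
      = (pvPatterns.findIdx? (fun pat => pat.2.1.contains p)).map (fun j => (j : Int)) := by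
  rw [pvProtoIdxB_eq]
  exact pvBuildIdx_get? _ p

theorem pvPortIdxB_get? (q : Int) :
    pvPortIdxB.get? q
      = (pvPatterns.findIdx? (fun pat => pat.2.2.contains q)).map (fun j => (j : Int)) := by
  rw [pvPortIdxB_eq]
  exact pvBuildIdx_get? _ q

-- min of two first-match indices = first index matching either predicate
theorem pvNmin_findIdx? {α : Type} (p q : α → Bool) (l : List α) :
    pvNmin (l.findIdx? p) (l.findIdx? q) = l.findIdx? (fun x => p x || q x) := by
  induction l with
  | nil => rfl
  | cons a l ih =>
      simp only [List.findIdx?_cons]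
      rcases Bool.eq_false_or_eq_true (p a) with hp | hp <;>
        rcases Bool.eq_false_or_eq_true (q a) with hq | hq <;>
          simp only [hp, hq, Bool.true_or, Bool.or_true, Bool.false_or, Bool.or_self,
            if_true, Bool.false_eq_true, if_false]
      · simp [pvNmin]
      · cases h : l.findIdx? q <;> simp [pvNmin, h]
      · cases h : l.findIdx? p <;> simp [pvNmin, h]
      · rw [← ih]
        cases h1 : l.findIdx? p <;> cases h2 : l.findIdx? q <;>
          simp [pvNmin] <;> omega

-- the B fold over the inputs, pushed down to Option Nat
theorem pvFoldl_bestStep_eq {κ : Type} [BEq κ] (idx : PySem.Dict κ Int) (F : κ → Option Nat)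
    (hF : ∀ x, idx.get? x = (F x).map (fun j => (j : Int))) (es : List κ) (b : Option Nat) :
    es.foldl (pvBestStep idx) (b.map (fun j => (j : Int)))
      = (es.foldl (fun b e => pvNmin b (F e)) b).map (fun j => (j : Int)) := by
  induction es generalizing b with
  | nil => rfl
  | cons e es ih =>
      simp only [List.foldl_cons]
      rw [pvBestStep_eq, hF, pvOmin_map_cast, ih]

theorem pvFoldl_bestStep_none {κ : Type} [BEq κ] (idx : PySem.Dict κ Int) (F : κ → Option Nat)
    (hF : ∀ x, idx.get? x = (F x).map (fun j => (j : Int))) (es : List κ) :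
    es.foldl (pvBestStep idx) none
      = (es.foldl (fun b e => pvNmin b (F e)) none).map (fun j => (j : Int)) :=
  pvFoldl_bestStep_eq idx F hF es none

theorem pvFoldl_nmin {α : Type} (g : α → Option Nat) (es : List α) (b0 : Option Nat) :
    es.foldl (fun b e => pvNmin b (g e)) b0
      = pvNmin b0 (es.foldl (fun b e => pvNmin b (g e)) none) := by
  induction es generalizing b0 with
  | nil => rw [List.foldl_nil, List.foldl_nil, pvNmin_none_right]
  | cons e es ih =>
      simp only [List.foldl_cons]
      rw [ih, ih (pvNmin none (g e)),
        show pvNmin none (g e) = g e from rfl, pvNmin_assoc]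

-- min over the input elements of each element's first pattern
-- = first pattern that any input element matches
theorem pvNbest_findIdx? {α β : Type} (f : β → α → Bool) (es : List α) (l : List β) :
    es.foldl (fun b e => pvNmin b (l.findIdx? (fun x => f x e))) none
      = l.findIdx? (fun x => es.any (fun e => f x e)) := by
  induction es with
  | nil =>
      rw [List.foldl_nil]
      rw [show (l.findIdx? fun x => ([] : List α).any (fun e => f x e)) = l.findIdx? (fun _ => false)
        from by simp]
      rw [show (l.findIdx? fun _ => false) = none from by simp [List.findIdx?_eq_none_iff]]
  | cons e es ih =>
      rw [List.foldl_cons, pvFoldl_nmin, ih,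
        show pvNmin none (l.findIdx? fun x => f x e) = l.findIdx? (fun x => f x e) from rfl,
        pvNmin_findIdx?]
      simp only [List.any_cons]

-- A's truthiness test on the set intersections = any-membership over the raw input lists
theorem pvOverlap_nonempty {α : Type} [BEq α] [LawfulBEq α] (xs ys : List α) :
    (!(PySem.Set.inter (PySem.Set.ofList xs) (PySem.Set.ofList ys)).isEmpty)
      = xs.any (fun x => ys.contains x) := by
  rw [Bool.eq_iff_iff]
  simp only [Bool.not_eq_eq_eq_not, Bool.not_true, List.isEmpty_eq_false_iff,
    ← List.isEmpty_eq_false_iff, List.isEmpty_eq_false_iff_exists_mem,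
    List.any_eq_true]
  constructor
  · rintro ⟨x, hx⟩
    rw [PySem.Set.mem_inter] at hx
    exact ⟨x, by simpa using hx.1, by simpa using hx.2⟩
  · rintro ⟨x, hx, hy⟩
    exact ⟨x, by rw [PySem.Set.mem_inter]; exact ⟨by simpa using hx, by simpa using hy⟩⟩

-- A = first-match rendering of the shared pattern table
theorem pvInferGoA_eq (ps : List String) (qs : List Int)
    (l : List (String × List String × List Int)) :
    pvInferGoA (PySem.Set.ofList ps) (PySem.Set.ofList qs) l
      = match l.findIdx? (fun pat =>
            ps.any (fun p => pat.2.1.contains p) || qs.any (fun q => pat.2.2.contains q)) with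
        | some i => (l.map (fun pat => pvTitle (PySem.Str.replace pat.1 "_" " "))).getD i
            "Unknown Component"
        | none => "Unknown Component" := by
  induction l with
  | nil => rfl
  | cons pat rest ih =>
      obtain ⟨name, cfgP, cfgQ⟩ := pat
      rw [List.findIdx?_cons]
      show (if (!(PySem.Set.inter (PySem.Set.ofList ps) (PySem.Set.ofList cfgP)).isEmpty
              || !(PySem.Set.inter (PySem.Set.ofList qs) (PySem.Set.ofList cfgQ)).isEmpty) = true
            then pvTitle (PySem.Str.replace name "_" " ")
            else pvInferGoA (PySem.Set.ofList ps) (PySem.Set.ofList qs) rest) = _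
      rw [pvOverlap_nonempty ps cfgP, pvOverlap_nonempty qs cfgQ]
      rcases Bool.eq_false_or_eq_true
          ((ps.any fun p => cfgP.contains p) || qs.any fun q => cfgQ.contains q) with h | h
      · simp only [h]; rfl
      · simp only [h, Bool.false_eq_true, if_false]
        rw [ih]
        cases hf : rest.findIdx? (fun pat =>
            (ps.any fun p => pat.2.1.contains p) || qs.any fun q => pat.2.2.contains q) <;>
          simp only [Option.map_none, Option.map_some, List.map_cons, List.getD_cons_succ]

-- the title-cased pattern names of the table are B's literal name list
theorem pvNames_eq :
    pvPatterns.map (fun pat => pvTitle (PySem.Str.replace pat.1 "_" " ")) = pvNamesB := by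
  decide

-- ===== VERDICT (by name: the statement is the Claim_ definition above) =====
theorem infer_component_type_py_spec : Claim_equal_infer_component_type_py := by
  intro protocols ports _
  show infer_component_type_py protocols ports = infer_component_type_py_alt protocols ports
  unfold infer_component_type_py infer_component_type_py_alt
  rw [pvInferGoA_eq, pvFoldl_bestStep_none pvProtoIdxB _ pvProtoIdxB_get?,
      pvFoldl_bestStep_eq pvPortIdxB _ pvPortIdxB_get?,
      pvFoldl_nmin,
      pvNbest_findIdx? (fun pat p => pat.2.1.contains p) protocols pvPatterns,
      pvNbest_findIdx? (fun pat q => pat.2.2.contains q) ports pvPatterns,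
      pvNmin_findIdx?]
  cases hf : pvPatterns.findIdx? (fun pat =>
      (protocols.any fun e => pat.2.1.contains e) || ports.any fun e => pat.2.2.contains e) with
  | none => rfl
  | some j => simp [pvNames_eq]
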